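-- pv_equiv track=rewrite | github.com/greg-suehr/Budge | budgebasic/import_transactions.py | validate_payload_mapping
-- ===== SOURCE A (Python) =====
-- def validate_payload_mapping(payload_mapping):
--     """transactions requires: description, date, inflow, outflow
--        allows: category_id, a list of tag_ids, memo
--     """
--     required_fields = {'description': 0, 'date': 0,
--                        'inflow': 0, 'outflow': 0 }
--
--     allowed_fields = ['category_id', 'tag_ids', 'memo']
--
--     for field in payload_mapping.keys():
--         if field in required_fields.keys():
--             required_fields[field] = 1
--         else:
--             if field not in allowed_fields: return False
--
--     if 0 in required_fields.values():
--         return False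
--     else:
--         return True
-- ===== SOURCE B (Python) =====
-- def validate_payload_mapping(payload_mapping):
--     """transactions requires: description, date, inflow, outflow
--        allows: category_id, a list of tag_ids, memo
--     """
--     required = {'description', 'date', 'inflow', 'outflow'}
--     allowed = {'category_id', 'tag_ids', 'memo'}
--     keys = set(payload_mapping.keys())
--     return required <= keys and keys <= (required | allowed)
-- ===== Notes on version B (the rewrite author's own statement) =====
-- stated objective: simpler
-- what changed: Replaces the per-key marking loop over a mutable required_fields dict (with early exit and a final 0-in-values scan) by two set-subset tests: required <= keys and keys <= required|allowed.
import Mathlib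
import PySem

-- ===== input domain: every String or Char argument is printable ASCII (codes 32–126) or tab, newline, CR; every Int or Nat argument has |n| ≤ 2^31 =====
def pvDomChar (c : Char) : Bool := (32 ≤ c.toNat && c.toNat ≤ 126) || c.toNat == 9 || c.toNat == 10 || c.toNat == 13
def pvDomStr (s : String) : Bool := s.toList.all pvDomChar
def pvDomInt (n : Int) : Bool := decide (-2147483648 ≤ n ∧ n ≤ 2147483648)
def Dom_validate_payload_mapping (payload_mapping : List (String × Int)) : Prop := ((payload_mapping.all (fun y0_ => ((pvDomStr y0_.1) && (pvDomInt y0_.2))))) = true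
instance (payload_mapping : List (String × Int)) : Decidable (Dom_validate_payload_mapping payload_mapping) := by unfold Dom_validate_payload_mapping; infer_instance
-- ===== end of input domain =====

-- B replaces A's marking loop over a mutable required_fields dict by two set-subset tests (objective: simpler).
-- ===== PORT A =====
-- A's loop over payload_mapping.keys(): mark required fields in the dict, early-return False on an unknown field;
-- afterwards return whether no required field is still 0.
def pvLoopA : List String → PySem.Dict String Int → Bool
  | [], required_fields => !((PySem.Dict.values required_fields).contains 0)
  | field :: rest, required_fields =>
    if PySem.Dict.contains required_fields field then
      pvLoopA rest (PySem.Dict.insert required_fields field 1)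
    else
      if ["category_id", "tag_ids", "memo"].contains field then pvLoopA rest required_fields
      else false

def validate_payload_mapping (payload_mapping : List (String × Int)) : Bool :=
  pvLoopA (PySem.Dict.keys (PySem.Dict.ofList payload_mapping))
    (PySem.Dict.ofList [("description", 0), ("date", 0), ("inflow", 0), ("outflow", 0)])

-- ===== PORT B =====
def validate_payload_mapping_alt (payload_mapping : List (String × Int)) : Bool :=
  let required : PySem.Set String := PySem.Set.ofList ["description", "date", "inflow", "outflow"]
  let allowed : PySem.Set String := PySem.Set.ofList ["category_id", "tag_ids", "memo"]
  let keys : PySem.Set String := PySem.Set.ofList (PySem.Dict.keys (PySem.Dict.ofList payload_mapping))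
  PySem.Set.issubset required keys && PySem.Set.issubset keys (PySem.Set.union required allowed)

-- ===== PRECONDITION & SPEC =====
def Spec_validate_payload_mapping (payload_mapping : List (String × Int)) (out : Bool) : Prop := out = validate_payload_mapping_alt payload_mapping
instance (payload_mapping : List (String × Int)) (out : Bool) : Decidable (Spec_validate_payload_mapping payload_mapping out) := by unfold Spec_validate_payload_mapping; infer_instance

-- ===== CLAIM (what is proved, stated in full; the proofs are below) =====
def Claim_equal_validate_payload_mapping : Prop := ∀ (payload_mapping : List (String × Int)), Dom_validate_payload_mapping payload_mapping → Spec_validate_payload_mapping payload_mapping (validate_payload_mapping payload_mapping)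

-- ===== LEMMAS AND PROOFS =====

-- ===== VERDICT (by name: the statement is the Claim_ definition above) =====
-- invariant of A's loop: result = (every remaining key is known) && (every still-0 entry gets marked)
lemma pvLoopA_inv (ks : List String) (d : PySem.Dict String Int) (hnd : d.keys.Nodup) :
    pvLoopA ks d =
      (ks.all (fun f => PySem.Dict.contains d f || ["category_id", "tag_ids", "memo"].contains f)
       && d.items.all (fun p => decide (p.2 ≠ 0) || ks.contains p.1)) := by
  induction ks generalizing d with
  | nil =>
    rw [pvLoopA, Bool.eq_iff_iff]
    simp [PySem.Dict.values, List.all_eq_true, List.mem_map]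
    constructor
    · rintro h a b hb rfl; exact h a hb
    · intro h x hx; exact h x 0 hx rfl
  | cons f rest ih =>
    by_cases hc : PySem.Dict.contains d f = true
    · rw [pvLoopA, if_pos hc, ih _ (PySem.Dict.nodup_keys_insert _ _ _ hnd)]
      simp only [List.all_cons, hc, Bool.true_or, Bool.true_and]
      congr 1
      · refine List.all_congr rfl (fun a => ?_)
        rw [PySem.Dict.contains_insert]
        by_cases h : a = f
        · subst h; simp [hc]
        · have hb : (a == f) = false := by simp [h]
          simp [hb]
      · rw [PySem.Dict.items_insert_of_contains]
        · rw [List.all_map]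
          refine List.all_congr rfl (fun p => ?_)
          by_cases h : p.1 = f
          · simp [h]
          · simp [h, List.contains_eq_mem]
        · exact hc
    · rw [Bool.not_eq_true] at hc
      rw [pvLoopA, if_neg (by simp [hc])]
      by_cases ha : (["category_id", "tag_ids", "memo"] : List String).contains f = true
      · rw [if_pos ha, ih d hnd]
        simp only [List.all_cons, hc, ha, Bool.false_or, Bool.true_and]
        rw [Bool.eq_iff_iff]
        simp only [Bool.and_eq_true, List.all_eq_true, List.contains_eq_mem, Bool.or_eq_true,
          decide_eq_true_iff, List.mem_cons]
        constructor
        · rintro ⟨h1, h2⟩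
          refine ⟨h1, fun p hp => ?_⟩
          rcases h2 p hp with h' | h'
          · exact Or.inl h'
          · exact Or.inr (Or.inr h')
        · rintro ⟨h1, h2⟩
          refine ⟨h1, fun p hp => ?_⟩
          rcases h2 p hp with h' | h'
          · exact Or.inl h'
          · rcases h' with h'' | h''
            · exfalso
              have hm := PySem.Dict.mem_keys_of_mem_items (d := d) (p := p) hp
              rw [PySem.Dict.contains_eq_decide_mem_keys] at hc
              rw [h''] at hm
              simp [hm] at hc
            · exact Or.inr h''
      · rw [Bool.not_eq_true] at ha
        rw [if_neg (by rw [ha]; simp)]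
        simp only [List.all_cons, hc, ha, Bool.false_or, Bool.false_and]

theorem validate_payload_mapping_spec : Claim_equal_validate_payload_mapping := by
  intro pm _
  unfold Spec_validate_payload_mapping
  rw [validate_payload_mapping, pvLoopA_inv _ _ (by decide), validate_payload_mapping_alt]
  rw [Bool.eq_iff_iff]
  simp only [Bool.and_eq_true, List.all_eq_true, Bool.or_eq_true, List.contains_eq_mem,
    decide_eq_true_iff, PySem.Set.issubset_iff, PySem.Set.mem_union, PySem.Set.mem_ofList]
  have hit : (PySem.Dict.ofList [("description", (0:Int)), ("date", 0), ("inflow", 0), ("outflow", 0)]).items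
      = [("description", 0), ("date", 0), ("inflow", 0), ("outflow", 0)] := by decide
  have hct : ∀ x : String, (PySem.Dict.ofList [("description", (0:Int)), ("date", 0), ("inflow", 0), ("outflow", 0)]).contains x
      = (x ∈ ["description", "date", "inflow", "outflow"] : Bool) := by
    intro x
    rw [PySem.Dict.contains_eq_decide_mem_keys]
    have hk : (PySem.Dict.ofList [("description", (0:Int)), ("date", 0), ("inflow", 0), ("outflow", 0)]).keys
        = ["description", "date", "inflow", "outflow"] := by decide
    rw [hk]
  simp only [hit, hct]
  simp only [List.mem_cons, decide_eq_true_iff, List.mem_nil_iff]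
  constructor
  · rintro ⟨h1, h2⟩
    refine ⟨fun x hx => ?_, fun x hx => ?_⟩
    · rcases hx with rfl | rfl | rfl | rfl | h
      · rcases h2 ("description", 0) (Or.inl rfl) with h' | h'
        · exact absurd rfl h'
        · exact h'
      · rcases h2 ("date", 0) (Or.inr (Or.inl rfl)) with h' | h'
        · exact absurd rfl h'
        · exact h'
      · rcases h2 ("inflow", 0) (Or.inr (Or.inr (Or.inl rfl))) with h' | h'
        · exact absurd rfl h'
        · exact h'
      · rcases h2 ("outflow", 0) (Or.inr (Or.inr (Or.inr (Or.inl rfl)))) with h' | h'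
        · exact absurd rfl h'
        · exact h'
      · cases h
    · have := h1 x hx
      tauto
  · rintro ⟨h1, h2⟩
    refine ⟨fun x hx => ?_, fun p hp => ?_⟩
    · have := h2 x hx
      tauto
    · rcases hp with rfl | rfl | rfl | rfl | h
      · exact Or.inr (h1 "description" (by tauto))
      · exact Or.inr (h1 "date" (by tauto))
      · exact Or.inr (h1 "inflow" (by tauto))
      · exact Or.inr (h1 "outflow" (by tauto))
      · cases h
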